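-- pv_equiv track=rewrite | github.com/HysenChan/vsCode | python/20250603/01Loops.py | nthMultipleOf4or7
-- ===== SOURCE A (Python) =====
-- def isMultipleOf4or7(x):
--     return ((x % 4) == 0) or ((x % 7) == 0)
--
-- def nthMultipleOf4or7(n):
--     count = 0
--     x = 0
--     while count <= n:
--         x = x + 1
--         if isMultipleOf4or7(x):
--             count = count + 1
--     return x
-- ===== SOURCE B (Python) =====
-- def nthMultipleOf4or7(n):
--     # Count of positive multiples of 4 or 7 up to x (inclusion-exclusion).
--     def count(x):
--         return x // 4 + x // 7 - x // 28
--
--     # Exponential search for an upper bound, then binary search for the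
--     # least x >= 0 with count(x) >= n + 1.
--     hi = 1
--     while count(hi) < n + 1:
--         hi *= 2
--     lo = 0
--     while lo < hi:
--         mid = (lo + hi) // 2
--         if count(mid) >= n + 1:
--             hi = mid
--         else:
--             lo = mid + 1
--     return lo
-- ===== Notes on version B (the rewrite author's own statement) =====
-- stated objective: faster
-- what changed: Replaced the count-every-integer-up-to-the-answer while loop by inclusion-exclusion counting (x//4 + x//7 - x//28) combined with exponential plus binary search for the least x with count >= n+1.
import Mathlib
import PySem

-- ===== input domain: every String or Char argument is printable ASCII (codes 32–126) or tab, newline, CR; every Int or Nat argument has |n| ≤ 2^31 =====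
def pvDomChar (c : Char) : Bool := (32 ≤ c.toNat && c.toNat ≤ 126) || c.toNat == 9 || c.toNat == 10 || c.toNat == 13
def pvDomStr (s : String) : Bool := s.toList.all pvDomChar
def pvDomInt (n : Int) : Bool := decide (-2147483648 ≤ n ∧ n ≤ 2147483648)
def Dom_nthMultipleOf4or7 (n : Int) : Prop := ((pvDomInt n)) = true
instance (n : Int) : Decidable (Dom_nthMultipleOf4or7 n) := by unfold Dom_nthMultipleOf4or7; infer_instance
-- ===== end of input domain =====

-- B replaces A's one-by-one counting loop by inclusion-exclusion counting with
-- exponential + binary search for the least x with count(x) >= n+1 (faster: asymptotic).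


-- ===== PORT A =====
def isMultipleOf4or7 (x : Int) : Bool :=
  (PySem.Int.mod x 4 == 0) || (PySem.Int.mod x 7 == 0)

-- A's while loop, made total by a fuel counter (the fuel provably suffices: the
-- loop body runs at most 28*(n+2) times — the proof is below the claim block).
def nthLoopA (fuel : Nat) (n count x : Int) : Int :=
  match fuel with
  | 0 => x
  | f + 1 =>
    if count ≤ n then
      if isMultipleOf4or7 (x + 1) then nthLoopA f n (count + 1) (x + 1)
      else nthLoopA f n count (x + 1)
    else x

def nthMultipleOf4or7 (n : Int) : Int :=
  nthLoopA (28 * (n + 2)).toNat n 0 0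

-- ===== PORT B =====
def altCount (x : Int) : Int :=
  PySem.Int.floordiv x 4 + PySem.Int.floordiv x 7 - PySem.Int.floordiv x 28

-- exponential search: double hi until count(hi) >= n+1 (fuel provably suffices)
def altGrow (fuel : Nat) (n hi : Int) : Int :=
  match fuel with
  | 0 => hi
  | f + 1 => if altCount hi < n + 1 then altGrow f n (hi * 2) else hi

-- binary search on [lo, hi] for the least x with count(x) >= n+1 (fuel provably suffices)
def altBin (fuel : Nat) (n lo hi : Int) : Int :=
  match fuel with
  | 0 => lo
  | f + 1 =>
    if lo < hi then
      if altCount (PySem.Int.floordiv (lo + hi) 2) ≥ n + 1 then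
        altBin f n lo (PySem.Int.floordiv (lo + hi) 2)
      else altBin f n (PySem.Int.floordiv (lo + hi) 2 + 1) hi
    else lo

def nthMultipleOf4or7_alt (n : Int) : Int :=
  let hi := altGrow (7 * (n + 1)).toNat n 1
  altBin hi.toNat n 0 hi

-- ===== PRECONDITION & SPEC =====
def Spec_nthMultipleOf4or7 (n : Int) (out : Int) : Prop := out = nthMultipleOf4or7_alt n
instance (n : Int) (out : Int) : Decidable (Spec_nthMultipleOf4or7 n out) := by unfold Spec_nthMultipleOf4or7; infer_instance

-- ===== CLAIM (what is proved, stated in full; the proofs are below) =====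
def Claim_equal_nthMultipleOf4or7 : Prop := ∀ (n : Int), Dom_nthMultipleOf4or7 n → Spec_nthMultipleOf4or7 n (nthMultipleOf4or7 n)

-- ===== LEMMAS AND PROOFS =====

lemma altCount_eq (x : Int) : altCount x = x / 4 + x / 7 - x / 28 := by
  simp only [altCount,
    PySem.Int.floordiv_eq_ediv_of_pos (show (0:Int) < 4 by omega),
    PySem.Int.floordiv_eq_ediv_of_pos (show (0:Int) < 7 by omega),
    PySem.Int.floordiv_eq_ediv_of_pos (show (0:Int) < 28 by omega)]

lemma isM_iff (y : Int) : isMultipleOf4or7 y = true ↔ (y % 4 = 0 ∨ y % 7 = 0) := by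
  simp only [isMultipleOf4or7, Bool.or_eq_true, beq_iff_eq,
    PySem.Int.mod_eq_emod_of_pos (show (0:Int) < 4 by omega),
    PySem.Int.mod_eq_emod_of_pos (show (0:Int) < 7 by omega)]

lemma altCount_succ (x : Int) :
    altCount (x + 1) = altCount x + (if isMultipleOf4or7 (x + 1) then 1 else 0) := by
  obtain ⟨q, r, hx, hr0, hr1⟩ : ∃ q r, x = 28 * q + r ∧ 0 ≤ r ∧ r < 28 :=
    ⟨x / 28, x % 28, by omega, by omega, by omega⟩
  by_cases hm : isMultipleOf4or7 (x + 1) = true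
  · rw [if_pos hm, altCount_eq, altCount_eq]
    rw [isM_iff] at hm
    subst hx
    interval_cases r <;> omega
  · rw [if_neg hm, altCount_eq, altCount_eq]
    rw [isM_iff] at hm
    rw [not_or] at hm
    subst hx
    interval_cases r <;> omega

lemma altCount_mono_add (x : Int) (k : Nat) : altCount x ≤ altCount (x + k) := by
  induction k with
  | zero => simp
  | succ m ih =>
      have h := altCount_succ (x + m)
      have he : (x : Int) + (m + 1 : Nat) = (x + m) + 1 := by push_cast; ring
      rw [he, h]
      split_ifs <;> omega

lemma altCount_mono {x y : Int} (h : x ≤ y) : altCount x ≤ altCount y := by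
  have := altCount_mono_add x (y - x).toNat
  have hx : x + ((y - x).toNat : Int) = y := by omega
  rwa [hx] at this

lemma altCount_lower (hi : Int) (h : 0 ≤ hi) : hi / 7 ≤ altCount hi := by
  rw [altCount_eq]
  obtain ⟨q, r, hx, hr0, hr1⟩ : ∃ q r, hi = 28 * q + r ∧ 0 ≤ r ∧ r < 28 :=
    ⟨hi / 28, hi % 28, by omega, by omega, by omega⟩
  subst hx
  interval_cases r <;> omega

-- A's loop (with sufficient fuel) returns the least integer above x whose count exceeds n.
lemma nthLoopA_spec (fuel : Nat) :
    ∀ n count x : Int, count = altCount x →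
      (28 * (n + 1 - count) + (28 - x % 28)).toNat ≤ fuel →
      x ≤ nthLoopA fuel n count x ∧ n + 1 ≤ altCount (nthLoopA fuel n count x) ∧
        ∀ z, x ≤ z → z < nthLoopA fuel n count x → altCount z ≤ n := by
  induction fuel with
  | zero =>
      intro n count x h hf
      have hx : 0 ≤ x % 28 ∧ x % 28 < 28 := ⟨Int.emod_nonneg x (by omega), Int.emod_lt_of_pos x (by omega)⟩
      have hcn : ¬ count ≤ n := by omega
      simp only [nthLoopA]
      exact ⟨le_refl x, by omega, fun z h1 h2 => by omega⟩
  | succ f ih =>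
      intro n count x h hf
      by_cases hc : count ≤ n
      · by_cases hm : isMultipleOf4or7 (x + 1) = true
        · have hstep : count + 1 = altCount (x + 1) := by
            rw [altCount_succ, if_pos hm, h]
          have hf' : (28 * (n + 1 - (count + 1)) + (28 - (x + 1) % 28)).toNat ≤ f := by
            omega
          obtain ⟨h1, h2, h3⟩ := ih n (count + 1) (x + 1) hstep hf'
          simp only [nthLoopA, if_pos hc, if_pos hm]
          refine ⟨by omega, h2, ?_⟩
          intro z hz1 hz2
          rcases eq_or_lt_of_le hz1 with rfl | hlt
          · omega
          · exact h3 z (by omega) hz2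
        · have hstep : count = altCount (x + 1) := by
            rw [altCount_succ, if_neg hm, h]; omega
          have hm' : (x + 1) % 4 ≠ 0 ∧ (x + 1) % 7 ≠ 0 := by
            rw [Bool.not_eq_true, ← Bool.not_eq_true, isM_iff, not_or] at hm
            exact hm
          have hf' : (28 * (n + 1 - count) + (28 - (x + 1) % 28)).toNat ≤ f := by
            omega
          obtain ⟨h1, h2, h3⟩ := ih n count (x + 1) hstep hf'
          simp only [nthLoopA, if_pos hc, if_neg hm]
          refine ⟨by omega, h2, ?_⟩
          intro z hz1 hz2
          rcases eq_or_lt_of_le hz1 with rfl | hlt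
          · omega
          · exact h3 z (by omega) hz2
      · simp only [nthLoopA, if_neg hc]
        exact ⟨le_refl x, by omega, fun z h1 h2 => by omega⟩

lemma altGrow_spec (fuel : Nat) :
    ∀ n hi : Int, 1 ≤ hi → (7 * (n + 1) - hi).toNat ≤ fuel →
      1 ≤ altGrow fuel n hi ∧ n + 1 ≤ altCount (altGrow fuel n hi) := by
  induction fuel with
  | zero =>
      intro n hi h1 hf
      have hge : 7 * (n + 1) ≤ hi := by omega
      have := altCount_lower hi (by omega)
      simp only [altGrow]
      constructor
      · exact h1
      · omega
  | succ f ih =>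
      intro n hi h1 hf
      by_cases hc : altCount hi < n + 1
      · have hle : hi ≤ 7 * n + 6 := by
          have := altCount_lower hi (by omega)
          omega
        have hf' : (7 * (n + 1) - hi * 2).toNat ≤ f := by omega
        have := ih n (hi * 2) (by omega) hf'
        simpa only [altGrow, if_pos hc] using this
      · simp only [altGrow, if_neg hc]
        exact ⟨h1, by omega⟩

lemma altBin_spec (fuel : Nat) :
    ∀ n lo hi : Int, 0 ≤ lo → lo ≤ hi → (hi - lo).toNat ≤ fuel →
      n + 1 ≤ altCount hi → (∀ z, 0 ≤ z → z < lo → altCount z ≤ n) →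
      0 ≤ altBin fuel n lo hi ∧ n + 1 ≤ altCount (altBin fuel n lo hi) ∧
        ∀ z, 0 ≤ z → z < altBin fuel n lo hi → altCount z ≤ n := by
  induction fuel with
  | zero =>
      intro n lo hi h0 hle hf hhi hinv
      have hlh : lo = hi := by omega
      simp only [altBin]
      exact ⟨h0, by rw [hlh]; exact hhi, fun z h1 h2 => hinv z h1 h2⟩
  | succ f ih =>
      intro n lo hi h0 hle hf hhi hinv
      by_cases hc : lo < hi
      · have hmid := PySem.Int.floordiv_two_mid_bounds (le_of_lt hc)
        have hmidlt : PySem.Int.floordiv (lo + hi) 2 < hi := by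
          rw [PySem.Int.floordiv_eq_ediv_of_pos (show (0:Int) < 2 by omega)] at hmid ⊢
          omega
        by_cases hg : altCount (PySem.Int.floordiv (lo + hi) 2) ≥ n + 1
        · have := ih n lo (PySem.Int.floordiv (lo + hi) 2) h0 hmid.1 (by omega) hg hinv
          simpa only [altBin, if_pos hc, if_pos hg] using this
        · have hinv' : ∀ z, 0 ≤ z → z < PySem.Int.floordiv (lo + hi) 2 + 1 → altCount z ≤ n := by
            intro z hz1 hz2
            by_cases hzlo : z < lo
            · exact hinv z hz1 hzlo
            · have : altCount z ≤ altCount (PySem.Int.floordiv (lo + hi) 2) :=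
                altCount_mono (by omega)
              omega
          have := ih n (PySem.Int.floordiv (lo + hi) 2 + 1) hi (by omega) (by omega)
            (by omega) hhi hinv'
          simpa only [altBin, if_pos hc, if_neg hg] using this
      · simp only [altBin, if_neg hc]
        have hlh : lo = hi := by omega
        exact ⟨h0, by rw [hlh]; exact hhi, fun z h1 h2 => hinv z h1 h2⟩

lemma least_unique {n a b : Int}
    (ha : 0 ≤ a ∧ n + 1 ≤ altCount a ∧ ∀ z, 0 ≤ z → z < a → altCount z ≤ n)
    (hb : 0 ≤ b ∧ n + 1 ≤ altCount b ∧ ∀ z, 0 ≤ z → z < b → altCount z ≤ n) :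
    a = b := by
  obtain ⟨ha0, ha1, ha2⟩ := ha
  obtain ⟨hb0, hb1, hb2⟩ := hb
  rcases lt_trichotomy a b with h | h | h
  · have := hb2 a ha0 h; omega
  · exact h
  · have := ha2 b hb0 h; omega

-- ===== VERDICT (by name: the statement is the Claim_ definition above) =====
theorem nthMultipleOf4or7_spec : Claim_equal_nthMultipleOf4or7 := by
  intro n _
  unfold Spec_nthMultipleOf4or7 nthMultipleOf4or7 nthMultipleOf4or7_alt
  have hA := nthLoopA_spec (28 * (n + 2)).toNat n 0 0 (by decide) (by omega)
  obtain ⟨hg1, hg2⟩ := altGrow_spec (7 * (n + 1)).toNat n 1 (by omega) (by omega)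
  have hB := altBin_spec (altGrow (7 * (n + 1)).toNat n 1).toNat n 0
    (altGrow (7 * (n + 1)).toNat n 1) (le_refl 0) (by omega) (by omega) hg2
    (fun z hz1 hz2 => by omega)
  exact least_unique ⟨by omega, hA.2.1, hA.2.2⟩ hB
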